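-- pv_equiv track=rewrite | github.com/Rvkstrauss/Python_projects | cyclopeptide_sequencing.py | circularize
-- ===== SOURCE A (Python) =====
-- def circularize(line):
--     subpeptides = [0]
--     for i in range(0,len(line)):
--         sum = 0
--         for j in range(i,len(line)):
--             sum += line[j]
--             subpeptides.append(sum)
--             if i >= 1 and j == len(line) - 1:
--                 for k in range(0, i-1):
--                     sum += line[k]
--                     subpeptides.append(sum)
--     return sorted(subpeptides)
-- ===== SOURCE B (Python) =====
-- def circularize(line):
--     n = len(line)
--     ext = line + line
--     out = [0]
--     if n > 0:
--         out.append(sum(line))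
--     for i in range(n):
--         out.extend(sum(ext[i:i + L]) for L in range(1, n))
--     return sorted(out)
-- ===== Notes on version B (the rewrite author's own statement) =====
-- stated objective: idiomatic
-- what changed: B scans the doubled list line+line and sums each slice ext[i:i+L] directly, replacing A's running-sum loop with its conditional wraparound sub-loop; the full cyclic mass is appended once up front.
import Mathlib
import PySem

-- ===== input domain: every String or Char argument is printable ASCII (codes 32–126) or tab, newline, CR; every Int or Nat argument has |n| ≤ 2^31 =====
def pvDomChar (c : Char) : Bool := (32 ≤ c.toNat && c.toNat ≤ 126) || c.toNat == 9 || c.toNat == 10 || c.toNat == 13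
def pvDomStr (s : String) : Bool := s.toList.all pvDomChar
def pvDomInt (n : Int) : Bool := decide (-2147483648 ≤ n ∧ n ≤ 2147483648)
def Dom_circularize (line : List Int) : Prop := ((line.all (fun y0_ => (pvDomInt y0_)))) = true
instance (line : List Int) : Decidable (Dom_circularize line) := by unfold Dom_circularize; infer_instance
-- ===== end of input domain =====

-- B sums slices of the doubled list line+line instead of A's running-sum loop with its conditional wraparound sub-loop; same sorted result (objective: idiomatic, not faster).

-- ===== PORT A =====
def circularize (line : List Int) : List Int :=
  let n : Int := (line.length : Int)
  let subpeptides : List Int :=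
    (PySem.List.pyRange 0 n 1).foldl (fun subs i =>
      ((PySem.List.pyRange i n 1).foldl (fun (st : Int × List Int) j =>
          if 1 ≤ i ∧ j = n - 1 then
            (PySem.List.pyRange 0 (i - 1) 1).foldl
              (fun (st2 : Int × List Int) k =>
                (st2.1 + PySem.List.pyGetD line k 0, st2.2 ++ [st2.1 + PySem.List.pyGetD line k 0]))
              (st.1 + PySem.List.pyGetD line j 0, st.2 ++ [st.1 + PySem.List.pyGetD line j 0])
          else
            (st.1 + PySem.List.pyGetD line j 0, st.2 ++ [st.1 + PySem.List.pyGetD line j 0]))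
        (0, subs)).2) [0]
  PySem.List.sorted subpeptides (fun x => x) false

-- ===== PORT B =====
def circularize_alt (line : List Int) : List Int :=
  let n : Int := (line.length : Int)
  let ext : List Int := line ++ line
  let out : List Int := [0]
  let out := if n > 0 then out ++ [line.sum] else out
  let out := (PySem.List.pyRange 0 n 1).foldl (fun acc i =>
      acc ++ (PySem.List.pyRange 1 n 1).map (fun L =>
        (PySem.List.slice ext (some i) (some (i + L))).sum)) out
  PySem.List.sorted out (fun x => x) false

-- ===== PRECONDITION & SPEC =====
def Spec_circularize (line : List Int) (out : List Int) : Prop := out = circularize_alt line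
instance (line : List Int) (out : List Int) : Decidable (Spec_circularize line out) := by unfold Spec_circularize; infer_instance

-- ===== CLAIM (what is proved, stated in full; the proofs are below) =====
def Claim_equal_circularize : Prop := ∀ (line : List Int), Dom_circularize line → Spec_circularize line (circularize line)

-- ===== LEMMAS AND PROOFS =====

/-- Running partial sums starting from `s` (the values appended by both running-sum loops). -/
def pvPsums : Int → List Int → List Int
  | _, [] => []
  | s, v :: vs => (s + v) :: pvPsums (s + v) vs

theorem pvPsums_append (xs ys : List Int) : ∀ s, pvPsums s (xs ++ ys) = pvPsums s xs ++ pvPsums (s + xs.sum) ys := by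
  induction xs with
  | nil => simp [pvPsums]
  | cons v vs ih => intro s; simp [pvPsums, ih, add_assoc]

theorem pvFoldl_run (vs : List Int) : ∀ (s : Int) (acc : List Int),
    vs.foldl (fun (st : Int × List Int) v => (st.1 + v, st.2 ++ [st.1 + v])) (s, acc)
      = (s + vs.sum, acc ++ pvPsums s vs) := by
  induction vs with
  | nil => simp [pvPsums]
  | cons v vs ih => intro s acc; simp [ih, pvPsums, add_assoc]

theorem pvPsums_eq_map (vs : List Int) : ∀ s,
    pvPsums s vs = (List.range vs.length).map (fun L => s + (vs.take (L + 1)).sum) := by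
  induction vs with
  | nil => simp [pvPsums]
  | cons v vs ih =>
    intro s
    simp [pvPsums, List.range_succ_eq_map, ih (s + v), List.map_map, Function.comp,
      Nat.succ_eq_add_one]
    intro a _; ring

/-- A running-sum loop over indices `a..m-1` of `l` is `pvPsums` of the slice. -/
theorem pvRunRange (l : List Int) (m : Nat) (hm : m ≤ l.length) (a : Int) (ha : 0 ≤ a)
    (s : Int) (acc : List Int) :
    (PySem.List.pyRange a (m : Int) 1).foldl
      (fun (st : Int × List Int) j =>
        (st.1 + PySem.List.pyGetD l j 0, st.2 ++ [st.1 + PySem.List.pyGetD l j 0])) (s, acc)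
      = (s + ((l.take m).drop a.toNat).sum, acc ++ pvPsums s ((l.take m).drop a.toNat)) := by
  have hl : (m : Int) = ((l.take m).length : Int) := by simp [Nat.min_eq_left hm]
  rw [hl, PySem.List.foldl_congr_mem _ _
    (fun (st : Int × List Int) j =>
      (fun (st : Int × List Int) v => (st.1 + v, st.2 ++ [st.1 + v])) st
        (PySem.List.pyGetD (l.take m) j 0)) _ ?_,
    PySem.List.foldl_pyRange_pyGetD' (l.take m) 0
      (fun (st : Int × List Int) v => (st.1 + v, st.2 ++ [st.1 + v])) (s, acc) ha]
  · exact pvFoldl_run _ s acc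
  · intro st j hj
    obtain ⟨h1, h2⟩ := PySem.List.mem_pyRange_one.mp hj
    have h0 : 0 ≤ j := le_trans ha h1
    have hjl : j < (l.length : Int) := by
      have : ((l.take m).length : Int) ≤ (l.length : Int) := by
        simp [Nat.min_eq_left hm]; omega
      omega
    simp only [PySem.List.pyGetD_eq_getElem l 0 h0 hjl,
      PySem.List.pyGetD_eq_getElem (l.take m) 0 h0 h2, List.getElem_take]

theorem pvLineSplit (l : List Int) (h : 0 < l.length) :
    l = l.take (l.length - 1) ++ [l[l.length - 1]] := by
  conv_lhs => rw [← List.dropLast_concat_getLast (List.ne_nil_of_length_pos h)]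
  rw [List.dropLast_eq_take, List.getLast_eq_getElem]

/-- A's inner loop (body of `for i in range(len(line))`) appends the running sums of the
rotation `l[i:] + l[:i-1]` (Nat subtraction: for `i = 0` this is just `l`). -/
theorem pvRowA (l : List Int) (i : Int) (h0 : 0 ≤ i) (hi : i < (l.length : Int))
    (subs : List Int) :
    ((PySem.List.pyRange i ((l.length : Int)) 1).foldl (fun (st : Int × List Int) j =>
        if 1 ≤ i ∧ j = (l.length : Int) - 1 then
          (PySem.List.pyRange 0 (i - 1) 1).foldl
            (fun (st2 : Int × List Int) k =>
              (st2.1 + PySem.List.pyGetD l k 0, st2.2 ++ [st2.1 + PySem.List.pyGetD l k 0]))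
            (st.1 + PySem.List.pyGetD l j 0, st.2 ++ [st.1 + PySem.List.pyGetD l j 0])
        else
          (st.1 + PySem.List.pyGetD l j 0, st.2 ++ [st.1 + PySem.List.pyGetD l j 0]))
      (0, subs)).2
    = subs ++ pvPsums 0 (l.drop i.toNat ++ l.take (i.toNat - 1)) := by
  have hn1 : 0 < l.length := by omega
  have hsplit : PySem.List.pyRange i (l.length : Int) 1
      = PySem.List.pyRange i ((l.length : Int) - 1) 1 ++ [(l.length : Int) - 1] := by
    conv_lhs => rw [show ((l.length : Int)) = ((l.length : Int) - 1) + 1 by ring]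
    exact PySem.List.pyRange_one_succ_right (by omega)
  rw [hsplit, List.foldl_append]
  have hm1 : ((l.length : Int) - 1) = ((l.length - 1 : Nat) : Int) := by omega
  have hpre : (PySem.List.pyRange i ((l.length : Int) - 1) 1).foldl (fun (st : Int × List Int) j =>
        if 1 ≤ i ∧ j = (l.length : Int) - 1 then
          (PySem.List.pyRange 0 (i - 1) 1).foldl
            (fun (st2 : Int × List Int) k =>
              (st2.1 + PySem.List.pyGetD l k 0, st2.2 ++ [st2.1 + PySem.List.pyGetD l k 0]))
            (st.1 + PySem.List.pyGetD l j 0, st.2 ++ [st.1 + PySem.List.pyGetD l j 0])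
        else
          (st.1 + PySem.List.pyGetD l j 0, st.2 ++ [st.1 + PySem.List.pyGetD l j 0]))
      (0, subs)
      = (0 + ((l.take (l.length - 1)).drop i.toNat).sum,
          subs ++ pvPsums 0 ((l.take (l.length - 1)).drop i.toNat)) := by
    rw [PySem.List.foldl_congr_mem _ _
      (fun (st : Int × List Int) j =>
        (st.1 + PySem.List.pyGetD l j 0, st.2 ++ [st.1 + PySem.List.pyGetD l j 0])) _ ?_]
    · rw [hm1]; exact pvRunRange l (l.length - 1) (by omega) i h0 0 subs
    · intro st j hj
      obtain ⟨hj1, hj2⟩ := PySem.List.mem_pyRange_one.mp hj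
      rw [if_neg (fun hc => by omega)]
  rw [hpre]
  simp only [List.foldl_cons, List.foldl_nil]
  have hlast : PySem.List.pyGetD l ((l.length : Int) - 1) 0 = l[l.length - 1]'(by omega) := by
    rw [PySem.List.pyGetD_eq_getElem l 0 (by omega) (by omega)]
    congr 1
    omega
  have htklen : (l.take (l.length - 1)).length = l.length - 1 := by simp
  have hdsplit : l.drop i.toNat
      = (l.take (l.length - 1)).drop i.toNat ++ [l[l.length - 1]'(by omega)] := by
    conv_lhs => rw [pvLineSplit l hn1]
    rw [List.drop_append, htklen, show i.toNat - (l.length - 1) = 0 by omega]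
    simp
  by_cases hcase : 1 ≤ i
  · rw [if_pos ⟨hcase, trivial⟩]
    have hm2 : (i - 1 : Int) = ((i.toNat - 1 : Nat) : Int) := by omega
    rw [hm2, pvRunRange l (i.toNat - 1) (by omega) 0 le_rfl _ _]
    simp only [Int.toNat_zero, List.drop_zero]
    rw [hdsplit]
    simp [pvPsums_append, pvPsums, hlast]
  · rw [if_neg (fun hc => hcase hc.1)]
    have hi0 : i = 0 := by omega
    subst hi0
    simp only [Int.toNat_zero, List.drop_zero, Nat.zero_sub, List.take_zero, List.append_nil]
    have hl0 : l = l.take (l.length - 1) ++ [l[l.length - 1]'(by omega)] := by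
      simpa using hdsplit
    conv_rhs => rw [hl0]
    rw [pvPsums_append]
    simp [pvPsums, hlast]

theorem pvFlatMap_congr {α β : Type} (l : List α) (f g : α → List β)
    (h : ∀ x ∈ l, f x = g x) : l.flatMap f = l.flatMap g := by
  rw [List.flatMap_def, List.flatMap_def, List.map_congr_left h]

theorem pvRange1 (n : Nat) :
    PySem.List.pyRange 1 (n : Int) 1 = (List.range (n - 1)).map (fun L => ((L + 1 : Nat) : Int)) := by
  induction n with
  | zero => rw [PySem.List.pyRange_one_eq_nil (by omega)]; simp
  | succ m ih =>
    cases m with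
    | zero => rw [PySem.List.pyRange_one_eq_nil (by omega)]; simp
    | succ k =>
      rw [show ((k + 1 + 1 : Nat) : Int) = ((k + 1 : Nat) : Int) + 1 by push_cast; ring,
        PySem.List.pyRange_one_succ_right (by push_cast; omega), ih,
        show (k + 1 + 1 - 1) = (k + 1 - 1) + 1 from rfl, List.range_succ, List.map_append]
      simp

/-- B's inner comprehension for rotation start `i` is `pvPsums` of the window of
length `len - 1` of the doubled list. -/
theorem pvRowB (l : List Int) (i : Int) (h0 : 0 ≤ i) (hi : i < (l.length : Int)) :
    (PySem.List.pyRange 1 (l.length : Int) 1).map (fun L =>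
        (PySem.List.slice (l ++ l) (some i) (some (i + L))).sum)
      = pvPsums 0 (((l ++ l).drop i.toNat).take (l.length - 1)) := by
  have hn1 : 0 < l.length := by omega
  have hlen : (((l ++ l).drop i.toNat).take (l.length - 1)).length = l.length - 1 := by
    simp; omega
  rw [pvRange1, List.map_map, pvPsums_eq_map _ 0, hlen]
  apply List.map_congr_left
  intro L hL
  have hL' : L < l.length - 1 := List.mem_range.mp hL
  have h1 : PySem.List.slice (l ++ l) (some i) (some (i + ((L : Int) + 1)))
      = ((l ++ l).drop i.toNat).take (L + 1) := by
    rw [PySem.List.slice_toNat (l ++ l) h0 (by omega)]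
    congr 1
    omega
  simp [h1, List.take_take, Nat.min_eq_left (by omega : L + 1 ≤ l.length - 1)]

/-- The rotation A builds for `1 ≤ i` is the window of the doubled list B sums over. -/
theorem pvRot (l : List Int) (i : Nat) (h1 : 1 ≤ i) (h2 : i < l.length) :
    l.drop i ++ l.take (i - 1) = ((l ++ l).drop i).take (l.length - 1) := by
  rw [List.drop_append, show i - l.length = 0 by omega, List.drop_zero]
  have ha : (l.drop i).take (l.length - 1) = l.drop i :=
    List.take_of_length_le (by simp; omega)
  have hb : l.length - 1 - (l.drop i).length = i - 1 := by simp; omega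
  rw [List.take_append, ha, hb]

/-- A's row at `i = 0` carries the full cyclic mass at the end; B appends it separately. -/
theorem pvHead (l : List Int) (hn1 : 0 < l.length) :
    pvPsums 0 l = pvPsums 0 ((l ++ l).take (l.length - 1)) ++ [l.sum] := by
  have hw : (l ++ l).take (l.length - 1) = l.take (l.length - 1) :=
    List.take_append_of_le_length (by omega)
  have hl0 : l = l.take (l.length - 1) ++ [l[l.length - 1]'(by omega)] := pvLineSplit l hn1
  have hsum : l.sum = (l.take (l.length - 1)).sum + l[l.length - 1]'(by omega) := by
    conv_lhs => rw [hl0]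
    rw [List.sum_append]
    simp
  rw [hw]
  conv_lhs => rw [hl0]
  rw [pvPsums_append]
  simp [pvPsums, hsum]

theorem circularize_spec_aux (l : List Int) : circularize l = circularize_alt l := by
  by_cases hnil : l = []
  · subst hnil; rfl
  have hn1 : 0 < l.length := List.length_pos_of_ne_nil hnil
  simp only [circularize, circularize_alt]
  apply PySem.List.sorted_eq_sorted_of_perm _ _ _ (fun a b h => h)
  rw [PySem.List.foldl_congr_mem _ _
      (fun (subs : List Int) (i : Int) =>
        subs ++ pvPsums 0 (l.drop i.toNat ++ l.take (i.toNat - 1))) _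
      (fun subs i hi => by
        obtain ⟨hi0, hin⟩ := PySem.List.mem_pyRange_one.mp hi
        exact pvRowA l i hi0 hin subs),
    PySem.List.foldl_append_eq_flatMap,
    if_pos (by exact_mod_cast hn1 : (0 : Int) < (l.length : Int)),
    PySem.List.foldl_append_eq_flatMap,
    pvFlatMap_congr (PySem.List.pyRange 0 ((l.length : Int)) 1)
      (fun i => (PySem.List.pyRange 1 ((l.length : Int)) 1).map (fun L =>
        (PySem.List.slice (l ++ l) (some i) (some (i + L))).sum))
      (fun i => pvPsums 0 (((l ++ l).drop i.toNat).take (l.length - 1)))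
      (fun i hi => by
        obtain ⟨hi0, hin⟩ := PySem.List.mem_pyRange_one.mp hi
        exact pvRowB l i hi0 hin),
    PySem.List.pyRange_one_cons (by exact_mod_cast hn1 : (0 : Int) < (l.length : Int)),
    List.flatMap_cons, List.flatMap_cons,
    pvFlatMap_congr (PySem.List.pyRange (0 + 1) ((l.length : Int)) 1)
      (fun i => pvPsums 0 (l.drop i.toNat ++ l.take (i.toNat - 1)))
      (fun i => pvPsums 0 (((l ++ l).drop i.toNat).take (l.length - 1)))
      (fun i hi => by
        obtain ⟨hi0, hin⟩ := PySem.List.mem_pyRange_one.mp hi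
        have h1 : (1 : Nat) ≤ i.toNat := by omega
        have h2 : i.toNat < l.length := by omega
        simpa using congrArg (pvPsums 0) (pvRot l i.toNat h1 h2))]
  simp only [Int.toNat_zero, List.drop_zero, Nat.zero_sub, List.take_zero, List.append_nil]
  rw [pvHead l hn1]
  have hperm : ∀ (P T R : List Int), ((P ++ T) ++ R).Perm (T ++ (P ++ R)) := by
    intro P T R
    have h := List.Perm.append_right R (l₁ := P ++ T) (l₂ := T ++ P) List.perm_append_comm
    simpa using h
  simpa [List.append_assoc] using
    (hperm (pvPsums 0 ((l ++ l).take (l.length - 1))) [l.sum]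
      ((PySem.List.pyRange (0 + 1) ((l.length : Int)) 1).flatMap
        (fun i => pvPsums 0 (((l ++ l).drop i.toNat).take (l.length - 1))))).cons 0

-- ===== VERDICT (by name: the statement is the Claim_ definition above) =====
theorem circularize_spec : Claim_equal_circularize := by
  intro l _
  exact circularize_spec_aux l
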